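-- pv_equiv track=rewrite | github.com/hashirkhan21/DG_Task | backend/app/search/query_builder.py | get_aliases_for_designation
-- ===== SOURCE A (Python) =====
-- from typing import Dict, List
--
-- _DESIGNATION_ALIASES: Dict[str, List[str]] = {
--     "ceo": ["CEO", "Chief Executive Officer"],
--     "cto": ["CTO", "Chief Technology Officer"],
--     "cfo": ["CFO", "Chief Financial Officer"],
--     "coo": ["COO", "Chief Operating Officer"],
--     "cmo": ["CMO", "Chief Marketing Officer"],
--     "founder": ["Founder", "Co-founder"],
--     "chairman": ["Chairman", "Chairwoman", "Chairperson"],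
-- }
--
-- def _normalize_designation(designation: str) -> str:
--     return designation.strip().lower()
--
-- def get_aliases_for_designation(designation: str) -> List[str]:
--     key = _normalize_designation(designation)
--     # If we know this designation, return its aliases; otherwise, just return the original
--     if key in _DESIGNATION_ALIASES:
--         return _DESIGNATION_ALIASES[key]
--     # Also try to look up raw (for exact phrases like 'chief executive officer')
--     for canon, aliases in _DESIGNATION_ALIASES.items():
--         if key in (a.lower() for a in aliases):
--             return aliases
--     return [designation.strip()]
-- ===== SOURCE B (Python) =====
-- from typing import Dict, List
--
-- _DESIGNATION_ALIASES: Dict[str, List[str]] = {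
--     "ceo": ["CEO", "Chief Executive Officer"],
--     "cto": ["CTO", "Chief Technology Officer"],
--     "cfo": ["CFO", "Chief Financial Officer"],
--     "coo": ["COO", "Chief Operating Officer"],
--     "cmo": ["CMO", "Chief Marketing Officer"],
--     "founder": ["Founder", "Co-founder"],
--     "chairman": ["Chairman", "Chairwoman", "Chairperson"],
-- }
--
-- # Flat reverse-lookup table built once: canonical key and every lowercased
-- # alias all map directly to the alias list.
-- _ALIAS_INDEX: Dict[str, List[str]] = {}
-- for _canon, _aliases in _DESIGNATION_ALIASES.items():
--     _ALIAS_INDEX[_canon] = _aliases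
--     for _a in _aliases:
--         _ALIAS_INDEX[_a.lower()] = _aliases
--
-- def get_aliases_for_designation(designation: str) -> List[str]:
--     stripped = designation.strip()
--     return _ALIAS_INDEX.get(stripped.lower(), [stripped])
-- ===== Notes on version B (the rewrite author's own statement) =====
-- stated objective: simpler
-- what changed: Replaces A's dict-membership check followed by a linear scan over each alias list's lowercased generator with a single flat reverse-lookup dict built once (canon key and every lowercased alias map directly to the alias list), so the function body is one normalized-key lookup with a fallback.
import Mathlib
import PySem

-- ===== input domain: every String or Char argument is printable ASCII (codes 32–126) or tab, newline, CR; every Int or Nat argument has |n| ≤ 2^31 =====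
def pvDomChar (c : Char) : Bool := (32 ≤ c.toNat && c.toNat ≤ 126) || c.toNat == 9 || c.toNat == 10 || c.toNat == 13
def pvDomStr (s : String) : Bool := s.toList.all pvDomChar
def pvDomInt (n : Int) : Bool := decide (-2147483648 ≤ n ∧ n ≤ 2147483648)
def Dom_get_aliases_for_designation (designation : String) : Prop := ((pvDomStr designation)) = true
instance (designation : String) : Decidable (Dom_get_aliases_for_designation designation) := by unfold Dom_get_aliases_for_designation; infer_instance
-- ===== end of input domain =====

-- B replaces A's dict-membership check plus linear scan over lowered alias lists by a
-- single flat reverse-lookup table built once (objective: simpler lookup; same result).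

-- ===== PORT A =====
def designationAliases : PySem.Dict String (List String) :=
  PySem.Dict.ofList [
    ("ceo", ["CEO", "Chief Executive Officer"]),
    ("cto", ["CTO", "Chief Technology Officer"]),
    ("cfo", ["CFO", "Chief Financial Officer"]),
    ("coo", ["COO", "Chief Operating Officer"]),
    ("cmo", ["CMO", "Chief Marketing Officer"]),
    ("founder", ["Founder", "Co-founder"]),
    ("chairman", ["Chairman", "Chairwoman", "Chairperson"])]

-- the `for canon, aliases in _DESIGNATION_ALIASES.items()` loop with its early return
def aliasScan (key : String) : List (String × List String) → Option (List String)
  | [] => none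
  | (_, aliases) :: rest =>
      if (aliases.map PySem.Str.lower).contains key then some aliases
      else aliasScan key rest

def get_aliases_for_designation (designation : String) : List String :=
  let key := PySem.Str.lower (PySem.Str.strip designation)
  match designationAliases.get? key with
  | some v => v
  | none =>
      match aliasScan key designationAliases.items with
      | some v => v
      | none => [PySem.Str.strip designation]

-- ===== PORT B =====
-- flat index built once: canon key and each lowercased alias map to the alias list
def aliasIndex : PySem.Dict String (List String) :=
  designationAliases.items.foldl
    (fun d p => p.2.foldl (fun d a => d.insert (PySem.Str.lower a) p.2) (d.insert p.1 p.2))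
    PySem.Dict.empty

def get_aliases_for_designation_alt (designation : String) : List String :=
  let stripped := PySem.Str.strip designation
  (aliasIndex.get? (PySem.Str.lower stripped)).getD [stripped]

-- ===== PRECONDITION & SPEC =====
def Spec_get_aliases_for_designation (designation : String) (out : List String) : Prop := out = get_aliases_for_designation_alt designation
instance (designation : String) (out : List String) : Decidable (Spec_get_aliases_for_designation designation out) := by unfold Spec_get_aliases_for_designation; infer_instance

-- ===== CLAIM (what is proved, stated in full; the proofs are below) =====
def Claim_equal_get_aliases_for_designation : Prop := ∀ (designation : String), Dom_get_aliases_for_designation designation → Spec_get_aliases_for_designation designation (get_aliases_for_designation designation)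

-- ===== LEMMAS AND PROOFS =====

-- all keys of B's flat index (canon keys and lowercased aliases)
def allIndexKeys : List String :=
  ["ceo", "chief executive officer", "cto", "chief technology officer",
   "cfo", "chief financial officer", "coo", "chief operating officer",
   "cmo", "chief marketing officer", "founder", "co-founder",
   "chairman", "chairwoman", "chairperson"]

theorem lookup_agrees (key : String) (fb : List String) :
    (match designationAliases.get? key with
     | some v => v
     | none =>
        match aliasScan key designationAliases.items with
        | some v => v
        | none => fb) = (aliasIndex.get? key).getD fb := by
  by_cases h : key ∈ allIndexKeys
  · simp only [allIndexKeys, List.mem_cons, List.not_mem_nil, or_false] at h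
    rcases h with h | h | h | h | h | h | h | h | h | h | h | h | h | h | h <;> subst h <;> rfl
  · simp only [allIndexKeys, List.mem_cons, List.not_mem_nil, or_false, not_or] at h
    obtain ⟨h1, h2, h3, h4, h5, h6, h7, h8, h9, h10, h11, h12, h13, h14, h15⟩ := h
    have hD : designationAliases = PySem.Dict.mk
        [("ceo", ["CEO", "Chief Executive Officer"]),
         ("cto", ["CTO", "Chief Technology Officer"]),
         ("cfo", ["CFO", "Chief Financial Officer"]),
         ("coo", ["COO", "Chief Operating Officer"]),
         ("cmo", ["CMO", "Chief Marketing Officer"]),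
         ("founder", ["Founder", "Co-founder"]),
         ("chairman", ["Chairman", "Chairwoman", "Chairperson"])] := by rfl
    have hI : aliasIndex = PySem.Dict.mk
        [("ceo", ["CEO", "Chief Executive Officer"]),
         ("chief executive officer", ["CEO", "Chief Executive Officer"]),
         ("cto", ["CTO", "Chief Technology Officer"]),
         ("chief technology officer", ["CTO", "Chief Technology Officer"]),
         ("cfo", ["CFO", "Chief Financial Officer"]),
         ("chief financial officer", ["CFO", "Chief Financial Officer"]),
         ("coo", ["COO", "Chief Operating Officer"]),
         ("chief operating officer", ["COO", "Chief Operating Officer"]),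
         ("cmo", ["CMO", "Chief Marketing Officer"]),
         ("chief marketing officer", ["CMO", "Chief Marketing Officer"]),
         ("founder", ["Founder", "Co-founder"]),
         ("co-founder", ["Founder", "Co-founder"]),
         ("chairman", ["Chairman", "Chairwoman", "Chairperson"]),
         ("chairwoman", ["Chairman", "Chairwoman", "Chairperson"]),
         ("chairperson", ["Chairman", "Chairwoman", "Chairperson"])] := by rfl
    have hA : designationAliases.get? key = none := by
      rw [hD]
      simp only [PySem.Dict.get?_mk_cons, beq_iff_eq,
        if_neg (Ne.symm h1), if_neg (Ne.symm h3), if_neg (Ne.symm h5), if_neg (Ne.symm h7),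
        if_neg (Ne.symm h9), if_neg (Ne.symm h11), if_neg (Ne.symm h13)]
      rfl
    have hS : aliasScan key designationAliases.items = none := by
      rw [hD]
      have e1 : PySem.Str.lower "CEO" = "ceo" := by rfl
      have e2 : PySem.Str.lower "Chief Executive Officer" = "chief executive officer" := by rfl
      have e3 : PySem.Str.lower "CTO" = "cto" := by rfl
      have e4 : PySem.Str.lower "Chief Technology Officer" = "chief technology officer" := by rfl
      have e5 : PySem.Str.lower "CFO" = "cfo" := by rfl
      have e6 : PySem.Str.lower "Chief Financial Officer" = "chief financial officer" := by rfl
      have e7 : PySem.Str.lower "COO" = "coo" := by rfl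
      have e8 : PySem.Str.lower "Chief Operating Officer" = "chief operating officer" := by rfl
      have e9 : PySem.Str.lower "CMO" = "cmo" := by rfl
      have e10 : PySem.Str.lower "Chief Marketing Officer" = "chief marketing officer" := by rfl
      have e11 : PySem.Str.lower "Founder" = "founder" := by rfl
      have e12 : PySem.Str.lower "Co-founder" = "co-founder" := by rfl
      have e13 : PySem.Str.lower "Chairman" = "chairman" := by rfl
      have e14 : PySem.Str.lower "Chairwoman" = "chairwoman" := by rfl
      have e15 : PySem.Str.lower "Chairperson" = "chairperson" := by rfl
      simp [aliasScan, e1, e2, e3, e4, e5, e6, e7, e8, e9, e10, e11, e12, e13, e14, e15,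
        h1, h2, h3, h4, h5, h6, h7, h8, h9, h10, h11, h12, h13, h14, h15]
    have hB : aliasIndex.get? key = none := by
      rw [hI]
      simp only [PySem.Dict.get?_mk_cons, beq_iff_eq,
        if_neg (Ne.symm h1), if_neg (Ne.symm h2), if_neg (Ne.symm h3), if_neg (Ne.symm h4),
        if_neg (Ne.symm h5), if_neg (Ne.symm h6), if_neg (Ne.symm h7), if_neg (Ne.symm h8),
        if_neg (Ne.symm h9), if_neg (Ne.symm h10), if_neg (Ne.symm h11), if_neg (Ne.symm h12),
        if_neg (Ne.symm h13), if_neg (Ne.symm h14), if_neg (Ne.symm h15)]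
      rfl
    simp [hA, hS, hB]

-- ===== VERDICT (by name: the statement is the Claim_ definition above) =====
set_option maxHeartbeats 1000000 in
theorem get_aliases_for_designation_spec : Claim_equal_get_aliases_for_designation := by
  intro designation _
  show get_aliases_for_designation designation = get_aliases_for_designation_alt designation
  unfold get_aliases_for_designation get_aliases_for_designation_alt
  exact lookup_agrees (PySem.Str.lower (PySem.Str.strip designation)) [PySem.Str.strip designation]
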